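-- pv_equiv track=rewrite | github.com/miaoli-psy/Psychophysics_exps | analysis/local_density.py | get_result_dic_porjection
-- ===== SOURCE A (Python) =====
-- def projection_list_all_nature_number(scatter_list:list) ->list:
--     '''This function expand y1 and y2 lists with interpolation so that
--     they have as many elements as x '''
--     all_nature_number_list = []
--     # Get individual x, y list
--     x_list, y_list = [], []
--     for point in scatter_list:
--         x_list.append(point[0]) # (10,13,14)
--         y_list.append(point[1]) # (2, 10,17)
--     x_start, x_end = x_list[0],x_list[-1] # 10, 14
--     y_start = y_list[0]
--     # loop in (x_min, x_max)
--     for x in range(x_start, x_end+1): #(10,11,12,13,14)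
--         # if init_x already have the nature_number_x, then we add this point into result
--         if x in x_list:
--             all_nature_number_list.append((x,y_list[0]))
--             # remove checked point
--             x_list.pop(0)
--             y_list.pop(0)
--         # if nature_number_x is not in init_x_list, then we add curr_nature_number_x, perious_result_y
--         else:
--             all_nature_number_list.append((x, all_nature_number_list[-1][1]))
--     return all_nature_number_list #this list has continues x
--
-- def get_result_dic_porjection(inputdict: dict)->dict:
--     result_dic_projection = {}
--     for key, values in inputdict.items():
--         project_list = []
--         for list_t in values:
--             project_list_t = projection_list_all_nature_number(list_t)
--             project_list.append(project_list_t)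
--         result_dic_projection.update({key: project_list})
--     return result_dic_projection
-- ===== SOURCE B (Python) =====
-- def get_result_dic_porjection(inputdict: dict) -> dict:
--     def project(points):
--         xs = [p[0] for p in points]
--         remaining = {}
--         for x in xs:
--             remaining[x] = remaining.get(x, 0) + 1
--         out = []
--         k = 0
--         y = None
--         for x in range(xs[0], xs[-1] + 1):
--             if remaining.get(x, 0) > 0:
--                 y = points[k][1]
--                 remaining[xs[k]] -= 1
--                 k += 1
--             out.append((x, y))
--         return out
--     return {key: [project(l) for l in values] for key, values in inputdict.items()}
-- ===== Notes on version B (the rewrite author's own statement) =====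
-- stated objective: alternative
-- what changed: Replaces A's per-step linear membership scan over a pop(0)-mutated x-queue (and the y-queue it drags along) by a multiset counter dict built once plus an advancing index: membership and 'pop' become O(1) dict operations in a single sweep over the integer range.
import Mathlib
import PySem

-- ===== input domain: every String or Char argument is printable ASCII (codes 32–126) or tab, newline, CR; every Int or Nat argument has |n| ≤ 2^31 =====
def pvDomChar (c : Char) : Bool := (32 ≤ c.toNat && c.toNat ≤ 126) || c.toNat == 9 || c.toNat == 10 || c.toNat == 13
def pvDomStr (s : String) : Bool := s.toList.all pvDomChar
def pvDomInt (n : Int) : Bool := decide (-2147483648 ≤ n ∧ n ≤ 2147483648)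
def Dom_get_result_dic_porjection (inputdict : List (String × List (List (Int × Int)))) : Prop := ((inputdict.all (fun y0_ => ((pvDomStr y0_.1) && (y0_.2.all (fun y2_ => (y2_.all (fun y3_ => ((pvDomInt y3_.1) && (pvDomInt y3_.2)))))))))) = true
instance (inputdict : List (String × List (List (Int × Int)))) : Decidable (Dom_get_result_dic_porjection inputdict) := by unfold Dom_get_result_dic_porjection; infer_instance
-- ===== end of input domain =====

-- B replaces A's per-step linear membership scan over a pop(0)-mutated queue by a multiset
-- counter dict built once plus an advancing index (objective: alternative algorithm).


-- ===== PORT A =====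
-- projection_list_all_nature_number, transliterated.  pvStA is the body of A's main loop:
-- state = (all_nature_number_list, x_list, y_list).  x_list[0] / x_list[-1] / y_list[0] /
-- all_nature_number_list[-1] are pyGetD with an arbitrary default: the defaults are only
-- reachable where Python raises IndexError (empty scatter_list, excluded by Pre_).
-- list.pop(0) on a nonempty list is List.tail.
def pvStA (st : List (Int × Int) × List Int × List Int) (x : Int) : List (Int × Int) × List Int × List Int :=
  if x ∈ st.2.1 then
    (st.1 ++ [(x, PySem.List.pyGetD st.2.2 0 0)], st.2.1.tail, st.2.2.tail)
  else
    (st.1 ++ [(x, (PySem.List.pyGetD st.1 (-1) (0, 0)).2)], st.2.1, st.2.2)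

def pvProjA (scatter_list : List (Int × Int)) : List (Int × Int) :=
  let xy : List Int × List Int :=
    scatter_list.foldl (fun (acc : List Int × List Int) point => (acc.1 ++ [point.1], acc.2 ++ [point.2])) ([], [])
  let x_start : Int := PySem.List.pyGetD xy.1 0 0
  let x_end : Int := PySem.List.pyGetD xy.1 (-1) 0
  -- A also binds y_start = y_list[0] but never uses it
  ((PySem.List.pyRange x_start (x_end + 1) 1).foldl pvStA ([], xy.1, xy.2)).1

def get_result_dic_porjection (inputdict : List (String × List (List (Int × Int)))) : List (String × List (List (Int × Int))) :=
  (inputdict.foldl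
    (fun (d : PySem.Dict String (List (List (Int × Int)))) kv =>
      d.insert kv.1 (kv.2.foldl (fun acc list_t => acc ++ [pvProjA list_t]) []))
    PySem.Dict.empty).items

-- ===== PORT B =====
-- project, transliterated.  pvStB is the body of B's sweep with state (out, remaining, k, y):
-- 'remaining.get(x, 0)' is Dict.getD, 'remaining[xs[k]] -= 1' is insert of getD - 1,
-- points[k] / xs[k] are pyGetD with index k (an int in Python, hence Int here).  y is
-- initialised 0 for Python's None: under Pre_ points ≠ [] the first swept x is xs[0] with a
-- positive count, so the initial value is never emitted.  xs[0] / xs[-1] are pyGetD,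
-- defaults reachable only where Python raises IndexError (excluded by Pre_).
def pvStB (points : List (Int × Int)) (xs : List Int) (st : List (Int × Int) × PySem.Dict Int Int × Int × Int) (x : Int) : List (Int × Int) × PySem.Dict Int Int × Int × Int :=
  let (out, rem, k, y) := st
  if rem.getD x 0 > 0 then
    let y' := (PySem.List.pyGetD points k ((0 : Int), (0 : Int))).2
    let key := PySem.List.pyGetD xs k 0
    (out ++ [(x, y')], rem.insert key (rem.getD key 0 - 1), k + 1, y')
  else
    (out ++ [(x, y)], rem, k, y)

def pvProjB (points : List (Int × Int)) : List (Int × Int) :=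
  let xs : List Int := points.map (fun p => p.1)
  let remaining : PySem.Dict Int Int :=
    xs.foldl (fun (d : PySem.Dict Int Int) x => d.insert x (d.getD x 0 + 1)) PySem.Dict.empty
  let x0 : Int := PySem.List.pyGetD xs 0 0
  let x1 : Int := PySem.List.pyGetD xs (-1) 0
  ((PySem.List.pyRange x0 (x1 + 1) 1).foldl (pvStB points xs) ([], remaining, 0, 0)).1

def get_result_dic_porjection_alt (inputdict : List (String × List (List (Int × Int)))) : List (String × List (List (Int × Int))) :=
  (inputdict.foldl
    (fun (d : PySem.Dict String (List (List (Int × Int)))) kv => d.insert kv.1 (kv.2.map pvProjB))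
    PySem.Dict.empty).items

-- ===== PRECONDITION & SPEC =====
-- A raises IndexError (x_list[0]) on any empty inner scatter list; Pre_ excludes exactly those.
def Pre_get_result_dic_porjection (inputdict : List (String × List (List (Int × Int)))) : Prop :=
  ∀ kv ∈ inputdict, ∀ l ∈ kv.2, l ≠ []
instance (inputdict : List (String × List (List (Int × Int)))) : Decidable (Pre_get_result_dic_porjection inputdict) := by unfold Pre_get_result_dic_porjection; infer_instance

def pvWitness_get_result_dic_porjection : (List (String × List (List (Int × Int)))) :=
  [("a", [[(1, 2), (3, 4)]])]

def Spec_get_result_dic_porjection (inputdict : List (String × List (List (Int × Int)))) (out : List (String × List (List (Int × Int)))) : Prop := out = get_result_dic_porjection_alt inputdict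
instance (inputdict : List (String × List (List (Int × Int)))) (out : List (String × List (List (Int × Int)))) : Decidable (Spec_get_result_dic_porjection inputdict out) := by unfold Spec_get_result_dic_porjection; infer_instance

-- ===== CLAIM (what is proved, stated in full; the proofs are below) =====
def Claim_equal_get_result_dic_porjection : Prop := ∀ (inputdict : List (String × List (List (Int × Int)))), Dom_get_result_dic_porjection inputdict → Pre_get_result_dic_porjection inputdict → Spec_get_result_dic_porjection inputdict (get_result_dic_porjection inputdict)

-- ===== LEMMAS AND PROOFS =====

-- loop invariant, past the first (always-matching) step: A's queues are l's projections with
-- their first k elements popped, B's counter holds exactly the multiset of the remaining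
-- x's, and B's carried y is the second component of the last emitted pair
theorem pvLoop (l : List (Int × Int)) :
    ∀ (m : Nat) (x E : Int) (k : Nat) (acc : List (Int × Int)) (rem : PySem.Dict Int Int) (y : Int),
      (E - x).toNat ≤ m →
      k ≤ l.length →
      (∀ v : Int, rem.getD v 0 = ((l.map (fun p => p.1)).drop k).count v) →
      (∃ w, acc.getLast? = some (w, y)) →
      ((PySem.List.pyRange x E 1).foldl pvStA (acc, (l.map (fun p => p.1)).drop k, (l.map (fun p => p.2)).drop k)).1
        = ((PySem.List.pyRange x E 1).foldl (pvStB l (l.map (fun p => p.1))) (acc, rem, (k : Int), y)).1 := by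
  intro m
  induction m with
  | zero =>
    intro x E k acc rem y hm hk hcnt hacc
    rw [PySem.List.pyRange_one_eq_nil (by omega)]; rfl
  | succ m ih =>
    intro x E k acc rem y hm hk hcnt hacc
    by_cases hEx : E ≤ x
    · rw [PySem.List.pyRange_one_eq_nil hEx]; rfl
    · rw [PySem.List.pyRange_one_cons (by omega), List.foldl_cons, List.foldl_cons]
      by_cases hmem : x ∈ (l.map (fun p => p.1)).drop k
      · -- both take the match branch
        have hkn : k < l.length := by
          by_contra hcon
          have : (l.map (fun p => p.1)).drop k = [] := by
            apply List.drop_eq_nil_of_le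
            simp; omega
          rw [this] at hmem
          exact absurd hmem (List.not_mem_nil)
        have hgd : l.getD k (0, 0) = l[k] := List.getD_eq_getElem l (0, 0) hkn
        have hdf : (l.map (fun p => p.1)).drop k = (l[k]).1 :: (l.map (fun p => p.1)).drop (k+1) := by
          rw [List.drop_eq_getElem_cons (by simpa using hkn)]; simp
        have hds : (l.map (fun p => p.2)).drop k = (l[k]).2 :: (l.map (fun p => p.2)).drop (k+1) := by
          rw [List.drop_eq_getElem_cons (by simpa using hkn)]; simp
        have hxk : (l.map (fun p => p.1))[k]'(by simpa using hkn) = (l[k]).1 := by simp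
        have hA : pvStA (acc, (l.map (fun p => p.1)).drop k, (l.map (fun p => p.2)).drop k) x
            = (acc ++ [(x, (l[k]).2)], (l.map (fun p => p.1)).drop (k+1), (l.map (fun p => p.2)).drop (k+1)) := by
          simp only [pvStA, hmem, if_pos]
          rw [hds, PySem.List.pyGetD_zero_cons, hdf, List.tail_cons, List.tail_cons]
        have hcpos : rem.getD x 0 > 0 := by
          rw [hcnt x]
          exact_mod_cast List.count_pos_iff.mpr hmem
        have hki : PySem.List.pyGetD l (k : Int) ((0 : Int), (0 : Int)) = l[k] := by
          rw [PySem.List.pyGetD_natCast, hgd]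
        have hkx : PySem.List.pyGetD (l.map (fun p => p.1)) (k : Int) 0 = (l[k]).1 := by
          rw [PySem.List.pyGetD_natCast, List.getD_eq_getElem _ _ (by simpa using hkn), hxk]
        have hB : pvStB l (l.map (fun p => p.1)) (acc, rem, (k : Int), y) x
            = (acc ++ [(x, (l[k]).2)], rem.insert (l[k]).1 (rem.getD (l[k]).1 0 - 1), (k : Int) + 1, (l[k]).2) := by
          simp only [pvStB, hcpos, if_pos, hki, hkx]
        rw [hA, hB]
        have hcnt' : ∀ v : Int, (rem.insert (l[k]).1 (rem.getD (l[k]).1 0 - 1)).getD v 0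
            = ((l.map (fun p => p.1)).drop (k+1)).count v := by
          intro v
          rw [PySem.Dict.getD_insert]
          have hc := hcnt v
          rw [hdf] at hc
          by_cases hv : v = (l[k]).1
          · subst hv
            rw [if_pos rfl, hcnt ((l[k]).1), hdf]
            simp [List.count_cons]
          · rw [if_neg hv]
            have hv' : ¬ (l[k]).1 = v := fun h => hv h.symm
            rw [hc, List.count_cons]
            simp [hv, hv']
        have hrec := ih (x+1) E (k+1) (acc ++ [(x, (l[k]).2)])
          (rem.insert (l[k]).1 (rem.getD (l[k]).1 0 - 1)) ((l[k]).2)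
          (by omega) (by omega) hcnt' ⟨x, List.getLast?_concat⟩
        have hcast : ((k : Int) + 1) = ((k + 1 : Nat) : Int) := by push_cast; ring
        rw [hcast]
        exact hrec
      · -- both take the fill branch
        obtain ⟨w, hw⟩ := hacc
        have hane : acc ≠ [] := by intro h; subst h; simp at hw
        have hlastv : acc.getLast hane = (w, y) := by
          have := List.getLast?_eq_some_getLast (l := acc) hane
          rw [hw] at this
          exact (Option.some_injective _ this.symm)
        have hA : pvStA (acc, (l.map (fun p => p.1)).drop k, (l.map (fun p => p.2)).drop k) x
            = (acc ++ [(x, y)], (l.map (fun p => p.1)).drop k, (l.map (fun p => p.2)).drop k) := by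
          simp only [pvStA, hmem, if_neg, not_false_iff]
          rw [PySem.List.pyGetD_neg_one acc (0, 0) hane, hlastv]
        have hczero : ¬ rem.getD x 0 > 0 := by
          rw [hcnt x]
          simp [List.count_eq_zero.mpr hmem]
        have hB : pvStB l (l.map (fun p => p.1)) (acc, rem, (k : Int), y) x
            = (acc ++ [(x, y)], rem, (k : Int), y) := by
          simp only [pvStB, hczero, if_neg, not_false_iff]
        rw [hA, hB]
        exact ih (x+1) E k (acc ++ [(x, y)]) rem y (by omega) hk hcnt ⟨x, List.getLast?_concat⟩

-- the two projection functions agree on every nonempty scatter list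
theorem pvProj_eq (l : List (Int × Int)) (hne : l ≠ []) : pvProjA l = pvProjB l := by
  have hlen : 0 < l.length := List.length_pos_iff.mpr hne
  have hmne : l.map (fun p => p.1) ≠ [] := by simp [hne]
  unfold pvProjA pvProjB
  have hxy : l.foldl (fun (acc : List Int × List Int) point => (acc.1 ++ [point.1], acc.2 ++ [point.2])) ([], [])
      = (l.map (fun p => p.1), l.map (fun p => p.2)) := by
    rw [PySem.List.foldl_prod_mk (fun s (e : Int × Int) => s ++ [e.1]) (fun s (e : Int × Int) => s ++ [e.2]) l [] []]
    rw [PySem.List.foldl_append_singleton_eq_map (fun p : Int × Int => p.1) l [],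
      PySem.List.foldl_append_singleton_eq_map (fun p : Int × Int => p.2) l []]
    simp
  rw [hxy]
  dsimp only
  have hcnt0 : ∀ v : Int,
      ((l.map (fun p => p.1)).foldl (fun (d : PySem.Dict Int Int) x => d.insert x (d.getD x 0 + 1)) PySem.Dict.empty).getD v 0
      = (l.map (fun p => p.1)).count v := by
    intro v
    rw [PySem.Dict.getD_foldl_insert_add_one]
    simp
  have hx0 : PySem.List.pyGetD (l.map (fun p => p.1)) 0 0 = (l[0]'hlen).1 := by
    rw [PySem.List.pyGetD_zero, List.getD_eq_getElem _ _ (by simpa using hlen)]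
    simp
  by_cases hlt : PySem.List.pyGetD (l.map (fun p => p.1)) (-1) 0 + 1 ≤ PySem.List.pyGetD (l.map (fun p => p.1)) 0 0
  · -- empty sweep on both sides
    rw [PySem.List.pyRange_one_eq_nil hlt]
    rfl
  · -- nonempty sweep: the first step always matches xs[0]; then the loop invariant applies
    rw [PySem.List.pyRange_one_cons (by omega), List.foldl_cons, List.foldl_cons]
    have hdf0 : l.map (fun p => p.1) = (l[0]'hlen).1 :: (l.map (fun p => p.1)).drop 1 := by
      cases l with
      | nil => exact absurd rfl hne
      | cons a t => rfl
    have hds0 : l.map (fun p => p.2) = (l[0]'hlen).2 :: (l.map (fun p => p.2)).drop 1 := by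
      cases l with
      | nil => exact absurd rfl hne
      | cons a t => rfl
    have hmem0 : (l[0]'hlen).1 ∈ l.map (fun p => p.1) := by
      rw [hdf0]; exact List.mem_cons_self
    have hy0 : PySem.List.pyGetD (l.map (fun p => p.2)) 0 0 = (l[0]'hlen).2 := by
      rw [PySem.List.pyGetD_zero, List.getD_eq_getElem _ _ (by simpa using hlen)]
      simp
    have hA : pvStA ([], l.map (fun p => p.1), l.map (fun p => p.2)) (PySem.List.pyGetD (l.map (fun p => p.1)) 0 0)
        = ([((l[0]'hlen).1, (l[0]'hlen).2)], (l.map (fun p => p.1)).drop 1, (l.map (fun p => p.2)).drop 1) := by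
      rw [hx0]
      simp only [pvStA, hmem0, if_pos, List.nil_append]
      rw [hy0, ← List.drop_one, ← List.drop_one]
    have hcpos : ((l.map (fun p => p.1)).foldl (fun (d : PySem.Dict Int Int) x => d.insert x (d.getD x 0 + 1)) PySem.Dict.empty).getD ((l[0]'hlen).1) 0 > 0 := by
      rw [hcnt0]
      exact_mod_cast List.count_pos_iff.mpr hmem0
    have hk0 : PySem.List.pyGetD l 0 ((0 : Int), (0 : Int)) = l[0]'hlen := by
      rw [PySem.List.pyGetD_zero, List.getD_eq_getElem l (0, 0) hlen]
    have hB : pvStB l (l.map (fun p => p.1))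
        ([], (l.map (fun p => p.1)).foldl (fun (d : PySem.Dict Int Int) x => d.insert x (d.getD x 0 + 1)) PySem.Dict.empty, 0, 0)
        (PySem.List.pyGetD (l.map (fun p => p.1)) 0 0)
        = ([((l[0]'hlen).1, (l[0]'hlen).2)],
           ((l.map (fun p => p.1)).foldl (fun (d : PySem.Dict Int Int) x => d.insert x (d.getD x 0 + 1)) PySem.Dict.empty).insert (l[0]'hlen).1
             (((l.map (fun p => p.1)).foldl (fun (d : PySem.Dict Int Int) x => d.insert x (d.getD x 0 + 1)) PySem.Dict.empty).getD (l[0]'hlen).1 0 - 1),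
           (0 : Int) + 1, (l[0]'hlen).2) := by
      simp only [pvStB, hk0, hx0, List.nil_append]
      rw [if_pos hcpos]
    rw [hA, hB]
    have hcnt1 : ∀ v : Int,
        (((l.map (fun p => p.1)).foldl (fun (d : PySem.Dict Int Int) x => d.insert x (d.getD x 0 + 1)) PySem.Dict.empty).insert (l[0]'hlen).1
          (((l.map (fun p => p.1)).foldl (fun (d : PySem.Dict Int Int) x => d.insert x (d.getD x 0 + 1)) PySem.Dict.empty).getD (l[0]'hlen).1 0 - 1)).getD v 0
        = ((l.map (fun p => p.1)).drop 1).count v := by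
      intro v
      rw [PySem.Dict.getD_insert]
      by_cases hv : v = (l[0]'hlen).1
      · subst hv
        rw [if_pos rfl, hcnt0]
        conv_lhs => rw [hdf0]
        simp [List.count_cons]
      · rw [if_neg hv, hcnt0]
        have hv' : ¬ (l[0]'hlen).1 = v := fun h => hv h.symm
        conv_lhs => rw [hdf0]
        rw [List.count_cons]
        simp [hv, hv']
    have hrec := pvLoop l ((PySem.List.pyGetD (l.map (fun p => p.1)) (-1) 0 + 1) - (PySem.List.pyGetD (l.map (fun p => p.1)) 0 0 + 1)).toNat
      (PySem.List.pyGetD (l.map (fun p => p.1)) 0 0 + 1) (PySem.List.pyGetD (l.map (fun p => p.1)) (-1) 0 + 1) 1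
      [((l[0]'hlen).1, (l[0]'hlen).2)] _ ((l[0]'hlen).2)
      (by omega) (by omega) hcnt1 ⟨(l[0]'hlen).1, rfl⟩
    rw [show ((1 : Nat) : Int) = (0 : Int) + 1 by norm_num] at hrec
    exact hrec

theorem pvOuterFold (input : List (String × List (List (Int × Int))))
    (h : ∀ kv ∈ input, ∀ l ∈ kv.2, pvProjA l = pvProjB l) :
    ∀ d : PySem.Dict String (List (List (Int × Int))),
      input.foldl (fun d kv => d.insert kv.1 (kv.2.foldl (fun acc list_t => acc ++ [pvProjA list_t]) [])) d
      = input.foldl (fun d kv => d.insert kv.1 (kv.2.map pvProjB)) d := by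
  induction input with
  | nil => intro d; rfl
  | cons kv rest ih =>
    intro d
    rw [List.foldl_cons, List.foldl_cons]
    have hv : kv.2.foldl (fun acc list_t => acc ++ [pvProjA list_t]) [] = kv.2.map pvProjB := by
      rw [PySem.List.foldl_append_singleton_eq_map pvProjA kv.2 [], List.nil_append]
      exact List.map_congr_left (fun l hl => h kv List.mem_cons_self l hl)
    rw [hv]
    exact ih (fun kv' hkv' => h kv' (List.mem_cons_of_mem _ hkv')) _

-- ===== VERDICT (by name: the statement is the Claim_ definition above) =====
theorem get_result_dic_porjection_spec : Claim_equal_get_result_dic_porjection := by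
  intro inputdict _ hpre
  show get_result_dic_porjection inputdict = get_result_dic_porjection_alt inputdict
  unfold get_result_dic_porjection get_result_dic_porjection_alt
  rw [pvOuterFold inputdict (fun kv hkv l hl => pvProj_eq l (hpre kv hkv l hl)) PySem.Dict.empty]
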